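-- pv_equiv track=rewrite | github.com/ingenieroedissonia-eng/maiie-systems | orchestrator/planner_executor.py | _filtrar_reglas
-- ===== SOURCE A (Python) =====
-- def _filtrar_reglas(raw_rules: str, tipo_tarea: str) -> str:
--     if not raw_rules: return ""
--     lineas = raw_rules.split('\n')
--     reglas_filtradas = []
--     capturando = True
--     for linea in lineas:
--         if linea.startswith("## "):
--             header = linea.upper()
--             if "GENERAL" in header or "ENVIRONMENT" in header or "CONSTRAINT" in header or "INFRA" in header:
--                 capturando = True
--             elif tipo_tarea in header:
--                 capturando = True
--             else:
--                 capturando = False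
--
--         if capturando:
--             reglas_filtradas.append(linea)
--     return "\n".join(reglas_filtradas)
-- ===== SOURCE B (Python) =====
-- def _filtrar_reglas(raw_rules: str, tipo_tarea: str) -> str:
--     if not raw_rules:
--         return ""
--     # Group lines into sections: a preamble plus one section per '## ' header.
--     sections = []
--     current = []
--     for line in raw_rules.split('\n'):
--         if line.startswith('## '):
--             sections.append(current)
--             current = [line]
--         else:
--             current.append(line)
--     sections.append(current)
--
--     def keep(sec):
--         if not sec or not sec[0].startswith('## '):
--             return True
--         h = sec[0].upper()
--         return ("GENERAL" in h or "ENVIRONMENT" in h or "CONSTRAINT" in h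
--                 or "INFRA" in h or tipo_tarea in h)
--
--     return "\n".join(line for sec in sections if keep(sec) for line in sec)
-- ===== Notes on version B (the rewrite author's own statement) =====
-- stated objective: alternative
-- what changed: Replaced A's single stateful line scan (a 'capturando' flag carried across lines) with a two-phase section decomposition: lines are first grouped into a preamble plus one section per '## ' header, then whole sections are kept or dropped by their header and the kept sections' lines are joined.
import Mathlib
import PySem

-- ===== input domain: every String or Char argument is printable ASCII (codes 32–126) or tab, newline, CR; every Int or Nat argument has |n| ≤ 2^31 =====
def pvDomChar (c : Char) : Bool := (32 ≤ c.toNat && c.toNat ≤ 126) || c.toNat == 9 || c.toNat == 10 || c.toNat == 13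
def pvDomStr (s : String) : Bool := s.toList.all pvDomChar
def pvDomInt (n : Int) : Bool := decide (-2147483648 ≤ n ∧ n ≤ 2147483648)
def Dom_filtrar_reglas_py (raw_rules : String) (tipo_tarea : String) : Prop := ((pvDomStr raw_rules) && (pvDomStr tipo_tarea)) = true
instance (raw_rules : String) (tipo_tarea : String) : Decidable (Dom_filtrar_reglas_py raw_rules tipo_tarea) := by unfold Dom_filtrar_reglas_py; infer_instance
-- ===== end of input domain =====

-- B regroups A's stateful per-line scan into a section decomposition (group by '## ' headers, keep/drop whole sections); return values proved equal.

-- ===== PORT A =====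
-- the header test of A: keyword or tipo_tarea occurs in the uppercased header line
def pvHdrKeep (tipo_tarea : String) (linea : String) : Bool :=
  let header := PySem.Str.upper linea
  PySem.Str.isIn "GENERAL" header || PySem.Str.isIn "ENVIRONMENT" header ||
  PySem.Str.isIn "CONSTRAINT" header || PySem.Str.isIn "INFRA" header ||
  PySem.Str.isIn tipo_tarea header

def filtrar_reglas_py (raw_rules : String) (tipo_tarea : String) : String :=
  if raw_rules = "" then "" else
  let lineas := (PySem.Str.split? raw_rules "\n").getD []
  let st := lineas.foldl (fun (st : List String × Bool) linea =>
    let capturando :=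
      if PySem.Str.startswith linea "## " then pvHdrKeep tipo_tarea linea
      else st.2
    if capturando then (st.1 ++ [linea], capturando) else (st.1, capturando))
    ([], true)
  PySem.Str.join "\n" st.1

-- ===== PORT B =====
def pvKeepSec (tipo_tarea : String) (sec : List String) : Bool :=
  match sec with
  | [] => true
  | l :: _ => if PySem.Str.startswith l "## " then pvHdrKeep tipo_tarea l else true

def filtrar_reglas_py_alt (raw_rules : String) (tipo_tarea : String) : String :=
  if raw_rules = "" then "" else
  let st := ((PySem.Str.split? raw_rules "\n").getD []).foldl
    (fun (st : List (List String) × List String) line =>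
      if PySem.Str.startswith line "## " then (st.1 ++ [st.2], [line])
      else (st.1, st.2 ++ [line]))
    ([], [])
  let sections := st.1 ++ [st.2]
  PySem.Str.join "\n" ((sections.filter (pvKeepSec tipo_tarea)).flatten)

-- ===== PRECONDITION & SPEC =====
def Spec_filtrar_reglas_py (raw_rules : String) (tipo_tarea : String) (out : String) : Prop := out = filtrar_reglas_py_alt raw_rules tipo_tarea
instance (raw_rules : String) (tipo_tarea : String) (out : String) : Decidable (Spec_filtrar_reglas_py raw_rules tipo_tarea out) := by unfold Spec_filtrar_reglas_py; infer_instance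

-- ===== CLAIM (what is proved, stated in full; the proofs are below) =====
def Claim_equal_filtrar_reglas_py : Prop := ∀ (raw_rules : String) (tipo_tarea : String), Dom_filtrar_reglas_py raw_rules tipo_tarea → Spec_filtrar_reglas_py raw_rules tipo_tarea (filtrar_reglas_py raw_rules tipo_tarea)

-- ===== LEMMAS AND PROOFS =====

-- abbreviations for the two loop bodies
def pvStepA (tipo_tarea : String) (st : List String × Bool) (linea : String) : List String × Bool :=
  let capturando :=
    if PySem.Str.startswith linea "## " then pvHdrKeep tipo_tarea linea
    else st.2
  if capturando then (st.1 ++ [linea], capturando) else (st.1, capturando)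

def pvStepB (st : List (List String) × List String) (line : String) : List (List String) × List String :=
  if PySem.Str.startswith line "## " then (st.1 ++ [st.2], [line])
  else (st.1, st.2 ++ [line])

-- result of B's loop relative to a starting current section, with no finished sections
def pvG (tipo : String) (ls : List String) (cur : List String) : List String :=
  let st := ls.foldl pvStepB ([], cur)
  ((st.1 ++ [st.2]).filter (pvKeepSec tipo)).flatten

-- B's finished-sections accumulator pulls out of the fold
lemma pvFoldB_pull (ls : List String) (secs : List (List String)) (cur : List String) :
    ls.foldl pvStepB (secs, cur) =
      (secs ++ (ls.foldl pvStepB ([], cur)).1, (ls.foldl pvStepB ([], cur)).2) := by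
  induction ls generalizing secs cur with
  | nil => simp
  | cons l ls ih =>
    simp only [List.foldl_cons, pvStepB]
    by_cases h : PySem.Str.startswith l "## " = true
    · simp only [h, if_true, List.nil_append]
      rw [ih (secs ++ [cur]) [l], ih [cur] [l]]
      simp
    · simp only [h]
      exact ih secs (cur ++ [l])

-- appending a non-header line does not change whether a section is kept
lemma pvKeepSec_append_nonheader (tipo : String) (cur : List String) (l : String)
    (h : PySem.Str.startswith l "## " = false) :
    pvKeepSec tipo (cur ++ [l]) = pvKeepSec tipo cur := by
  cases cur with
  | nil =>
    have h2 : PySem.Chars.startswith l.toList ['#', '#', ' '] = false := by simpa using h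
    simp [pvKeepSec, h2]
  | cons a t => simp [pvKeepSec]

-- main loop invariant: A's fold run with capturando = keep(cur) and the kept lines of cur
-- already appended equals regs ++ (B's section-wise result starting from cur)
lemma pvLoop (tipo : String) (ls : List String) (cur regs : List String) :
    (ls.foldl (pvStepA tipo) (regs ++ (if pvKeepSec tipo cur then cur else []), pvKeepSec tipo cur)).1
      = regs ++ pvG tipo ls cur := by
  induction ls generalizing cur regs with
  | nil => by_cases hc : pvKeepSec tipo cur = true <;> simp [pvG, hc]
  | cons l ls ih =>
    simp only [List.foldl_cons]
    by_cases h : PySem.Str.startswith l "## " = true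
    · have h2 : PySem.Chars.startswith l.toList ['#', '#', ' '] = true := by simpa using h
      have hk : pvKeepSec tipo [l] = pvHdrKeep tipo l := by simp [pvKeepSec, h2]
      have hstep : pvStepA tipo (regs ++ (if pvKeepSec tipo cur then cur else []), pvKeepSec tipo cur) l
          = ((regs ++ (if pvKeepSec tipo cur then cur else [])) ++ (if pvKeepSec tipo [l] then [l] else []), pvKeepSec tipo [l]) := by
        simp only [pvStepA, h, if_true, hk]
        by_cases hc : pvHdrKeep tipo l = true <;> simp [hc]
      rw [hstep, ih [l] (regs ++ (if pvKeepSec tipo cur then cur else []))]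
      have hg : pvG tipo (l :: ls) cur = (if pvKeepSec tipo cur then cur else []) ++ pvG tipo ls [l] := by
        simp only [pvG, List.foldl_cons, pvStepB, h, if_true, List.nil_append]
        rw [pvFoldB_pull ls [cur] [l]]
        by_cases hc : pvKeepSec tipo cur = true <;>
          simp [List.filter_append, hc, List.flatten_append]
      rw [hg, List.append_assoc]
    · have h' : PySem.Str.startswith l "## " = false := by simpa using h
      have hk := pvKeepSec_append_nonheader tipo cur l h'
      have hstep : pvStepA tipo (regs ++ (if pvKeepSec tipo cur then cur else []), pvKeepSec tipo cur) l
          = (regs ++ (if pvKeepSec tipo (cur ++ [l]) then cur ++ [l] else []), pvKeepSec tipo (cur ++ [l])) := by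
        simp only [pvStepA, h', Bool.false_eq_true, hk]
        by_cases hc : pvKeepSec tipo cur = true <;> simp [hc]
      rw [hstep, ih (cur ++ [l]) regs]
      have hg : pvG tipo (l :: ls) cur = pvG tipo ls (cur ++ [l]) := by
        have h2 : PySem.Chars.startswith l.toList ['#', '#', ' '] = false := by simpa using h'
        simp [pvG, pvStepB, h2]
      rw [hg]

-- ===== VERDICT (by name: the statement is the Claim_ definition above) =====
theorem filtrar_reglas_py_spec : Claim_equal_filtrar_reglas_py := by
  intro raw tipo _
  unfold Spec_filtrar_reglas_py filtrar_reglas_py filtrar_reglas_py_alt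
  by_cases h : raw = ""
  · simp [h]
  · simp only [h]
    have h2 : (List.foldl (pvStepA tipo) ([], true) ((PySem.Str.split? raw "\n").getD [])).1
        = pvG tipo ((PySem.Str.split? raw "\n").getD []) [] := by
      simpa [pvKeepSec] using pvLoop tipo ((PySem.Str.split? raw "\n").getD []) [] []
    exact congrArg (PySem.Str.join "\n") h2
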